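-- pv_equiv track=rewrite | github.com/zofialuther/CS8395-08-Paper1-updated | data/translated-code/direct-translations/python-to-python/Truncatable-primes.py | truncatableprime
-- ===== SOURCE A (Python) =====
-- def primes(n):
--     multiples = set()
--     prime = []
--     for i in range(2, n+1):
--         if i not in multiples:
--             prime.append(i)
--             multiples.update(set(range(i*i, n+1, i)))
--     return prime
--
-- def truncatableprime(n):
--     'Return a longest left and right truncatable primes below n'
--     primelist = [str(x) for x in primes(n)[::-1]]
--     primeset = set(primelist)
--     for num in primelist:
--         alltruncs = set(num[i:] for i in range(len(num)))
--         if alltruncs.issubset(primeset):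
--             truncateleft = int(num)
--             break
--     for num in primelist:
--         alltruncs = set(num[:i+1] for i in range(len(num)))
--         if alltruncs.issubset(primeset):
--             truncateright = int(num)
--             break
--     return truncateleft, truncateright
-- ===== SOURCE B (Python) =====
-- def truncatableprime(n):
--     'Return a longest left and right truncatable primes below n'
--     # inline sieve collecting prime decimal strings in increasing order
--     composite = set()
--     plist = []
--     for i in range(2, n + 1):
--         if i not in composite:
--             plist.append(str(i))
--             for j in range(i * i, n + 1, i):
--                 composite.add(j)
--     # dynamic programming: a prime string is left-(right-)truncatable iff it is a
--     # single digit or its tail (init) is a previously seen left-(right-)truncatable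
--     # prime string; primes are visited in increasing order, so the truncation,
--     # being numerically smaller, has already been classified.
--     lset = set()
--     rset = set()
--     left = right = None
--     for s in plist:
--         if len(s) == 1 or s[1:] in lset:
--             lset.add(s)
--             left = int(s)
--         if len(s) == 1 or s[:-1] in rset:
--             rset.add(s)
--             right = int(s)
--     return left, right
-- ===== Notes on version B (the rewrite author's own statement) =====
-- stated objective: alternative
-- what changed: B replaces A's two descending scans, each rebuilding the full set of truncations of every candidate and testing set inclusion against the set of all prime strings, by a single ascending pass with dynamic programming: a prime string is left-(right-)truncatable iff it is one digit long or its tail (init) is an already-classified left-(right-)truncatable prime string, so the per-candidate inner truncation loop and the global prime-string set disappear.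
import Mathlib
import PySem

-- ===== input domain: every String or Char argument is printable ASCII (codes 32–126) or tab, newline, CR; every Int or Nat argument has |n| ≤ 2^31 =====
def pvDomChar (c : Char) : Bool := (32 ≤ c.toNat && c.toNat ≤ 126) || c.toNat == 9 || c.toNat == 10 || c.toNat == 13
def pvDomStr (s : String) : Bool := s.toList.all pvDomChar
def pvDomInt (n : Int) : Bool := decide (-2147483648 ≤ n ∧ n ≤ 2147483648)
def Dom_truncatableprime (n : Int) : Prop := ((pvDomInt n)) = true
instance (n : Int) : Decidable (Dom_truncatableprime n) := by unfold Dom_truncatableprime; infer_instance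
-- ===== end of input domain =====

-- B replaces A's two descending scans (each building the set of all truncations and
-- testing set inclusion) by one ascending pass with dynamic programming: a prime string
-- is left-(right-)truncatable iff it is a single digit or its tail (init) is an
-- already-classified left-(right-)truncatable prime string.  Objective: alternative.

-- ===== PORT A =====
-- helper primes(n): sieve collecting primes in a list, marking multiples in a set
-- Python sets here are only ever membership-tested, so they are modelled by Std.HashSet
-- (iteration order is never consumed); multiples.update(set(range(i*i, n+1, i))) inserts
-- every element of the range.
def pvSieveStepA (n : Int) (st : Std.HashSet Int × List Int) (i : Int) : Std.HashSet Int × List Int :=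
  if st.1.contains i then st
  else ((PySem.List.pyRange (i*i) (n+1) i).foldl (fun c j => c.insert j) st.1, st.2 ++ [i])

def pvPrimesA (n : Int) : List Int :=
  ((PySem.List.pyRange 2 (n+1) 1).foldl (pvSieveStepA n) ((∅ : Std.HashSet Int), [])).2

-- set(num[i:] for i in range(len(num))).issubset(primeset)
def pvCondL (pset : Std.HashSet String) (num : String) : Bool :=
  (PySem.Set.ofList ((PySem.List.pyRange 0 (PySem.Str.len num) 1).map
      (fun i => PySem.Str.slice num (some i) none))).all (fun t => pset.contains t)

-- set(num[:i+1] for i in range(len(num))).issubset(primeset)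
def pvCondR (pset : Std.HashSet String) (num : String) : Bool :=
  (PySem.Set.ofList ((PySem.List.pyRange 0 (PySem.Str.len num) 1).map
      (fun i => PySem.Str.slice num none (some (i+1))))).all (fun t => pset.contains t)

def truncatableprime (n : Int) : List Int :=
  let primelist : List String :=
    ((PySem.List.slice? (pvPrimesA n) none none (-1)).getD []).map (fun x => PySem.Int.toStr x)
  let primeset : Std.HashSet String := Std.HashSet.ofList primelist
  -- the two for-loops with break: first element satisfying the condition
  match primelist.find? (pvCondL primeset), primelist.find? (pvCondR primeset) with
  | some numL, some numR => [(PySem.Int.ofStr? numL).getD 0, (PySem.Int.ofStr? numR).getD 0]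
  | _, _ => []   -- unreachable under Pre_: the Python raises NameError here

-- ===== PORT B =====
-- inline sieve collecting the prime decimal strings in increasing order
def pvSieveStepB (n : Int) (st : Std.HashSet Int × List String) (i : Int) : Std.HashSet Int × List String :=
  if st.1.contains i then st
  else ((PySem.List.pyRange (i*i) (n+1) i).foldl (fun c j => c.insert j) st.1,
        st.2 ++ [PySem.Int.toStr i])

-- one pass: state = ((lset, rset), (left, right))
def pvScanStepB (st : (PySem.Set String × PySem.Set String) × (Option Int × Option Int))
    (s : String) : (PySem.Set String × PySem.Set String) × (Option Int × Option Int) :=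
  let st1 :=
    if PySem.Str.len s == 1 || PySem.Set.contains st.1.1 (PySem.Str.slice s (some 1) none)
    then ((PySem.Set.add st.1.1 s, st.1.2), (some ((PySem.Int.ofStr? s).getD 0), st.2.2))
    else st
  if PySem.Str.len s == 1 || PySem.Set.contains st1.1.2 (PySem.Str.slice s none (some (-1)))
  then ((st1.1.1, PySem.Set.add st1.1.2 s), (st1.2.1, some ((PySem.Int.ofStr? s).getD 0)))
  else st1

def truncatableprime_alt (n : Int) : List Int :=
  let plist : List String :=
    ((PySem.List.pyRange 2 (n+1) 1).foldl (pvSieveStepB n) ((∅ : Std.HashSet Int), [])).2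
  let fin := plist.foldl pvScanStepB ((PySem.Set.empty, PySem.Set.empty), (none, none))
  match fin.2.1 with
  | none => []   -- the Python B returns (None, None) only outside Pre_
  | some l =>
    match fin.2.2 with
    | none => []
    | some r => [l, r]

-- ===== PRECONDITION & SPEC =====
-- Pre_ excludes the inputs on which the sieve yields no prime at all, so A's
-- search loops never break and A raises NameError.
def Pre_truncatableprime (n : Int) : Prop := 2 ≤ n
instance (n : Int) : Decidable (Pre_truncatableprime n) := by unfold Pre_truncatableprime; infer_instance
def pvWitness_truncatableprime : Int := (10)

def Spec_truncatableprime (n : Int) (out : List Int) : Prop := out = truncatableprime_alt n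
instance (n : Int) (out : List Int) : Decidable (Spec_truncatableprime n out) := by unfold Spec_truncatableprime; infer_instance

-- ===== CLAIM (what is proved, stated in full; the proofs are below) =====
def Claim_equal_truncatableprime : Prop := ∀ (n : Int), Dom_truncatableprime n → Pre_truncatableprime n → Spec_truncatableprime n (truncatableprime n)

-- ===== LEMMAS AND PROOFS =====


lemma pv_sieve_rel (n : Int) (l : List Int) (S : Std.HashSet Int) (acc : List Int) :
    l.foldl (pvSieveStepB n) (S, acc.map PySem.Int.toStr)
      = ((l.foldl (pvSieveStepA n) (S, acc)).1,
         (l.foldl (pvSieveStepA n) (S, acc)).2.map PySem.Int.toStr) := by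
  induction l generalizing S acc with
  | nil => simp
  | cons i l ih =>
    simp only [List.foldl_cons]
    have hstep : pvSieveStepB n (S, acc.map PySem.Int.toStr) i
        = ((pvSieveStepA n (S, acc) i).1, (pvSieveStepA n (S, acc) i).2.map PySem.Int.toStr) := by
      by_cases h : S.contains i = true <;>
        simp [pvSieveStepA, pvSieveStepB, h]
    rw [hstep]
    have := ih (pvSieveStepA n (S, acc) i).1 (pvSieveStepA n (S, acc) i).2
    simpa using this

lemma pv_foldA_acc (n : Int) (l : List Int) (S : Std.HashSet Int) (acc : List Int) :
    ∃ t, (l.foldl (pvSieveStepA n) (S, acc)).2 = acc ++ t ∧ t.Sublist l := by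
  induction l generalizing S acc with
  | nil => exact ⟨[], by simp, by simp⟩
  | cons i l ih =>
    simp only [List.foldl_cons]
    by_cases h : S.contains i = true
    · have hst : pvSieveStepA n (S, acc) i = (S, acc) := by simp [pvSieveStepA, h]
      rw [hst]
      obtain ⟨t, ht, hs⟩ := ih S acc
      exact ⟨t, ht, hs.cons i⟩
    · have hst : pvSieveStepA n (S, acc) i
          = ((PySem.List.pyRange (i*i) (n+1) i).foldl (fun c j => c.insert j) S, acc ++ [i]) := by
        simp [pvSieveStepA, h]
      rw [hst]
      obtain ⟨t, ht, hs⟩ := ih ((PySem.List.pyRange (i*i) (n+1) i).foldl (fun c j => c.insert j) S) (acc ++ [i])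
      exact ⟨i :: t, by simpa using ht, hs.cons₂ i⟩

lemma pv_primesA_sublist (n : Int) : (pvPrimesA n).Sublist (PySem.List.pyRange 2 (n+1) 1) := by
  obtain ⟨t, ht, hs⟩ := pv_foldA_acc n (PySem.List.pyRange 2 (n+1) 1) (∅ : Std.HashSet Int) []
  unfold pvPrimesA
  rw [ht]; simpa using hs

lemma pv_primesA_pairwise (n : Int) : (pvPrimesA n).Pairwise (· < ·) :=
  (PySem.List.pairwise_lt_pyRange_one 2 (n+1)).sublist (pv_primesA_sublist n)

lemma pv_primesA_mem (n : Int) {x : Int} (hx : x ∈ pvPrimesA n) : 2 ≤ x ∧ x < n + 1 :=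
  (PySem.List.mem_pyRange_one.mp ((pv_primesA_sublist n).mem hx))

-- ----- decimal-length facts about Nat.toDigits (used for the DP ordering argument) -----
lemma pv_toDigitsCore_bound : ∀ (f n : Nat) (l : List Char), n < f →
    l.length < (Nat.toDigitsCore 10 f n l).length ∧
    n < 10 ^ ((Nat.toDigitsCore 10 f n l).length - l.length) := by
  intro f
  induction f with
  | zero => intro n l h; omega
  | succ f ih =>
    intro n l h
    simp only [Nat.toDigitsCore]
    by_cases h0 : n / 10 = 0
    · simp only [h0, if_true]
      constructor
      · simp
      · simp only [List.length_cons]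
        have : n % 10 < 10 := Nat.mod_lt _ (by norm_num)
        have hn : n = 10 * (n / 10) + n % 10 := (Nat.div_add_mod n 10).symm ▸ by omega
        simp only [Nat.add_sub_cancel_left, pow_one]
        omega
    · simp only [h0, if_false]
      have hlt : n / 10 < f := by
        have : n / 10 < n := Nat.div_lt_self (by omega) (by norm_num)
        omega
      obtain ⟨ih1, ih2⟩ := ih (n / 10) ((n % 10).digitChar :: l) hlt
      simp only [List.length_cons] at ih1 ih2
      refine ⟨by omega, ?_⟩
      set L := (Nat.toDigitsCore 10 f (n / 10) ((n % 10).digitChar :: l)).length with hL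
      have hsub : L - l.length = (L - (l.length + 1)) + 1 := by omega
      rw [hsub, pow_succ]
      have : n % 10 < 10 := Nat.mod_lt _ (by norm_num)
      set K := 10 ^ (L - (l.length + 1)) with hK
      omega

lemma pv_toDigits_len_pos (a : Nat) : 1 ≤ (Nat.toDigits 10 a).length := by
  have := pv_toDigitsCore_bound (a + 1) a [] (by omega)
  simpa [Nat.toDigits] using this.1

lemma pv_lt_pow_toDigits (a : Nat) : a < 10 ^ (Nat.toDigits 10 a).length := by
  have := pv_toDigitsCore_bound (a + 1) a [] (by omega)
  simpa [Nat.toDigits] using this.2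

lemma pv_pow_le_toDigits (a : Nat) (h : 2 ≤ (Nat.toDigits 10 a).length) :
    10 ^ ((Nat.toDigits 10 a).length - 1) ≤ a := by
  by_contra hc
  push Not at hc
  have := Nat.toDigits_length 10 a ((Nat.toDigits 10 a).length - 1) (by omega) hc
  omega

lemma pv_toChars_nonneg (p : Int) (h : 0 ≤ p) :
    PySem.Int.toChars p = Nat.toDigits 10 p.toNat := by
  simp [PySem.Int.toChars]; omega

-- a decimal representation one digit shorter names a smaller number
lemma pv_shorter_lt {r p : Int} (hr : 0 ≤ r) (hp : 0 ≤ p)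
    (h : (PySem.Int.toChars r).length + 1 = (PySem.Int.toChars p).length) : r < p := by
  rw [pv_toChars_nonneg r hr, pv_toChars_nonneg p hp] at h
  have h1 : r.toNat < 10 ^ (Nat.toDigits 10 r.toNat).length := pv_lt_pow_toDigits r.toNat
  have h2 : 10 ^ ((Nat.toDigits 10 p.toNat).length - 1) ≤ p.toNat :=
    pv_pow_le_toDigits p.toNat (by have := pv_toDigits_len_pos r.toNat; omega)
  have h3 : (Nat.toDigits 10 p.toNat).length - 1 = (Nat.toDigits 10 r.toNat).length := by omega
  rw [h3] at h2
  omega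

-- ----- string helpers -----
def pvStrSuffix (s : String) (k : Nat) : String := String.ofList (s.toList.drop k)
def pvStrPrefix (s : String) (k : Nat) : String := String.ofList (s.toList.take k)

-- the property "every suffix (prefix) of s is the string of some listed prime"
def pvCondL' (pl : List String) (s : String) : Prop :=
  ∀ k : Nat, k < s.toList.length → pvStrSuffix s k ∈ pl
def pvCondR' (pl : List String) (s : String) : Prop :=
  ∀ k : Nat, k < s.toList.length → pvStrPrefix s (k + 1) ∈ pl

lemma pv_slice_from_eq (s : String) (i : Int) (h : 0 ≤ i) :
    PySem.Str.slice s (some i) none = pvStrSuffix s i.toNat := by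
  apply String.toList_inj.mp
  rw [PySem.Str.toList_slice, PySem.Chars.slice_eq_listSlice]
  simp [PySem.List.slice_from _ h, pvStrSuffix, String.toList_ofList]

lemma pv_slice_to_eq (s : String) (i : Int) (h : 0 ≤ i) :
    PySem.Str.slice s none (some i) = pvStrPrefix s i.toNat := by
  apply String.toList_inj.mp
  rw [PySem.Str.toList_slice, PySem.Chars.slice_eq_listSlice]
  simp [PySem.List.slice_to _ h, pvStrPrefix, String.toList_ofList]

lemma pv_slice_tail (s : String) : PySem.Str.slice s (some 1) none = pvStrSuffix s 1 := by
  have := pv_slice_from_eq s 1 (by norm_num)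
  simpa using this

lemma pv_slice_dropLast (s : String) :
    PySem.Str.slice s none (some (-1)) = pvStrPrefix s (s.toList.length - 1) := by
  apply String.toList_inj.mp
  rw [PySem.Str.slice_to_neg_one]
  simp [pvStrPrefix, String.toList_ofList, List.dropLast_eq_take]

lemma pv_condL_iff (pset : Std.HashSet String) (pl : List String)
    (hm : ∀ t, pset.contains t = true ↔ t ∈ pl) (s : String) :
    pvCondL pset s = true ↔ pvCondL' pl s := by
  unfold pvCondL
  rw [List.all_eq_true]
  constructor
  · intro h k hk
    rw [← hm]
    have hkmem : (k : Int) ∈ PySem.List.pyRange 0 (PySem.Str.len s) 1 := by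
      rw [PySem.List.mem_pyRange_one, PySem.Str.len_eq]
      constructor <;> [positivity; exact_mod_cast hk]
    have : PySem.Str.slice s (some (k : Int)) none
        ∈ (PySem.List.pyRange 0 (PySem.Str.len s) 1).map (fun i => PySem.Str.slice s (some i) none) :=
      List.mem_map.mpr ⟨(k : Int), hkmem, rfl⟩
    have hmem := h _ ((PySem.Set.mem_ofList _ _).mpr this)
    rwa [pv_slice_from_eq s k (by positivity), Int.toNat_natCast] at hmem
  · intro h x hx
    obtain ⟨i, hi, hix⟩ := List.mem_map.mp ((PySem.Set.mem_ofList _ _).mp hx)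
    rw [PySem.List.mem_pyRange_one, PySem.Str.len_eq] at hi
    rw [hm, ← hix, pv_slice_from_eq s i hi.1]
    exact h i.toNat (by omega)

lemma pv_condR_iff (pset : Std.HashSet String) (pl : List String)
    (hm : ∀ t, pset.contains t = true ↔ t ∈ pl) (s : String) :
    pvCondR pset s = true ↔ pvCondR' pl s := by
  unfold pvCondR
  rw [List.all_eq_true]
  constructor
  · intro h k hk
    rw [← hm]
    have hkmem : (k : Int) ∈ PySem.List.pyRange 0 (PySem.Str.len s) 1 := by
      rw [PySem.List.mem_pyRange_one, PySem.Str.len_eq]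
      constructor <;> [positivity; exact_mod_cast hk]
    have : PySem.Str.slice s none (some ((k : Int) + 1))
        ∈ (PySem.List.pyRange 0 (PySem.Str.len s) 1).map (fun i => PySem.Str.slice s none (some (i + 1))) :=
      List.mem_map.mpr ⟨(k : Int), hkmem, rfl⟩
    have hmem := h _ ((PySem.Set.mem_ofList _ _).mpr this)
    have hcast : ((k : Int) + 1).toNat = k + 1 := by omega
    rwa [pv_slice_to_eq s ((k : Int) + 1) (by positivity), hcast] at hmem
  · intro h x hx
    obtain ⟨i, hi, hix⟩ := List.mem_map.mp ((PySem.Set.mem_ofList _ _).mp hx)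
    rw [PySem.List.mem_pyRange_one, PySem.Str.len_eq] at hi
    rw [hm, ← hix, pv_slice_to_eq s (i + 1) (by omega)]
    have hcast : (i + 1).toNat = i.toNat + 1 := by omega
    rw [hcast]
    exact h i.toNat (by omega)

-- ----- the prime-string list and A's prime set -----
def pvPL (n : Int) : List String := (pvPrimesA n).map PySem.Int.toStr

lemma pv_primelist_eq (n : Int) :
    ((PySem.List.slice? (pvPrimesA n) none none (-1)).getD []).map PySem.Int.toStr
      = (pvPL n).reverse := by
  rw [PySem.List.slice?_none_none_neg_one]
  simp [pvPL]

lemma pv_mem_psetn (n : Int) (t : String) :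
    (Std.HashSet.ofList ((pvPL n).reverse)).contains t = true ↔ t ∈ pvPL n := by
  simp

lemma pv_toList_toStr_nonneg (p : Int) (hp : 0 ≤ p) :
    (PySem.Int.toStr p).toList = Nat.toDigits 10 p.toNat := by
  rw [PySem.Int.toList_toStr, pv_toChars_nonneg p hp]

lemma pv_toStr_len_pos (p : Int) (hp : 0 ≤ p) : 1 ≤ (PySem.Int.toStr p).toList.length := by
  rw [pv_toList_toStr_nonneg p hp]; exact pv_toDigits_len_pos _

lemma pv_suffix_zero (s : String) : pvStrSuffix s 0 = s := by
  simp [pvStrSuffix]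

lemma pv_suffix_toList (s : String) (k : Nat) : (pvStrSuffix s k).toList = s.toList.drop k := by
  simp [pvStrSuffix, String.toList_ofList]

lemma pv_prefix_toList (s : String) (k : Nat) : (pvStrPrefix s k).toList = s.toList.take k := by
  simp [pvStrPrefix, String.toList_ofList]

lemma pv_suffix_shift (s t : String) (h : t.toList = s.toList.drop 1) (j : Nat) :
    pvStrSuffix t j = pvStrSuffix s (j + 1) := by
  apply String.toList_inj.mp
  rw [pv_suffix_toList, pv_suffix_toList, h, List.drop_drop]
  congr 1
  omega

lemma pv_prefix_shift (s t : String) (h : t.toList = s.toList.dropLast) (j : Nat)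
    (hj : j + 1 ≤ s.toList.length - 1) :
    pvStrPrefix t (j + 1) = pvStrPrefix s (j + 1) := by
  apply String.toList_inj.mp
  rw [pv_prefix_toList, pv_prefix_toList, h, List.dropLast_eq_take, List.take_take]
  congr 1
  omega

lemma pv_prefix_full (s : String) (k : Nat) (h : s.toList.length ≤ k) : pvStrPrefix s k = s := by
  apply String.toList_inj.mp
  rw [pv_prefix_toList, List.take_of_length_le h]

-- the element smaller than p sits in the part of the prime list before p
lemma pv_mem_P1 (n : Int) (P1 P2 : List Int) (p r : Int)
    (hP : pvPrimesA n = P1 ++ p :: P2) (hr : r ∈ pvPrimesA n) (hlt : r < p) : r ∈ P1 := by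
  have hpw := pv_primesA_pairwise n
  rw [hP] at hpw hr
  rcases List.mem_append.mp hr with h1 | h2
  · exact h1
  · rcases List.mem_cons.mp h2 with rfl | h3
    · omega
    · have := (List.pairwise_cons.mp (hpw.sublist (List.sublist_append_right P1 _))).1 r h3
      omega

-- main condition equivalence, left side
lemma pv_eqL (n : Int) (P1 P2 : List Int) (p : Int) (hP : pvPrimesA n = P1 ++ p :: P2)
    (L : PySem.Set String)
    (hmem : ∀ t, t ∈ L ↔ t ∈ P1.map PySem.Int.toStr
                  ∧ pvCondL (Std.HashSet.ofList ((pvPL n).reverse)) t = true) :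
    ((PySem.Str.len (PySem.Int.toStr p) == 1
      || PySem.Set.contains L (PySem.Str.slice (PySem.Int.toStr p) (some 1) none)) = true)
      ↔ pvCondL (Std.HashSet.ofList ((pvPL n).reverse)) (PySem.Int.toStr p) = true := by
  set s := PySem.Int.toStr p with hs
  have hp2 : 2 ≤ p := by
    refine (pv_primesA_mem n ?_).1
    rw [hP]; exact List.mem_append.mpr (Or.inr (List.mem_cons_self))
  have hsPL : s ∈ pvPL n := by
    refine List.mem_map.mpr ⟨p, ?_, rfl⟩
    rw [hP]; exact List.mem_append.mpr (Or.inr (List.mem_cons_self))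
  have hlen1 : (PySem.Str.len s == 1) = true ↔ s.toList.length = 1 := by
    rw [PySem.Str.len_eq]
    simp
  rw [pv_condL_iff _ _ (pv_mem_psetn n), pv_slice_tail]
  rw [Bool.or_eq_true, hlen1, PySem.Set.contains_iff, hmem]
  constructor
  · rintro (h1 | ⟨htpre, htcond⟩)
    · intro k hk
      have : k = 0 := by omega
      subst this
      rw [pv_suffix_zero]
      exact hsPL
    · rw [pv_condL_iff _ _ (pv_mem_psetn n)] at htcond
      intro k hk
      match k with
      | 0 => rw [pv_suffix_zero]; exact hsPL
      | (j+1) =>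
        rw [← pv_suffix_shift s (pvStrSuffix s 1) (pv_suffix_toList s 1) j]
        refine htcond j ?_
        rw [pv_suffix_toList]
        simp only [List.length_drop]
        omega
  · intro h
    by_cases hl : s.toList.length = 1
    · exact Or.inl hl
    · have hlen2 : 2 ≤ s.toList.length := by
        have hh := pv_toStr_len_pos p (by omega)
        have hsl : s.toList.length = (PySem.Int.toStr p).toList.length := by rw [hs]
        omega
      obtain ⟨r, hrP, hrs⟩ := List.mem_map.mp (h 1 (by omega))
      have hr2 : 2 ≤ r := (pv_primesA_mem n hrP).1
      have hrlen : (PySem.Int.toChars r).length + 1 = (PySem.Int.toChars p).length := by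
        have h1 : (PySem.Int.toStr r).toList = (pvStrSuffix s 1).toList := by rw [hrs]
        rw [PySem.Int.toList_toStr, pv_suffix_toList] at h1
        have h2 : s.toList = PySem.Int.toChars p := by rw [hs, PySem.Int.toList_toStr]
        rw [h1, h2]
        simp only [List.length_drop]
        rw [h2] at hlen2
        omega
      have hrp : r < p := pv_shorter_lt (by omega) (by omega) hrlen
      refine Or.inr ⟨List.mem_map.mpr ⟨r, pv_mem_P1 n P1 P2 p r hP hrP hrp, ?_⟩, ?_⟩
      · exact hrs.symm ▸ rfl
    -- cond for the tail
      · rw [pv_condL_iff _ _ (pv_mem_psetn n)]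
        intro j hj
        rw [← hrs] at hj ⊢
        have htl : (PySem.Int.toStr r).toList = s.toList.drop 1 := by
          rw [hrs, pv_suffix_toList]
        rw [pv_suffix_shift s (PySem.Int.toStr r) htl j]
        refine h (j+1) ?_
        rw [htl] at hj
        simp only [List.length_drop] at hj
        omega

-- main condition equivalence, right side
lemma pv_eqR (n : Int) (P1 P2 : List Int) (p : Int) (hP : pvPrimesA n = P1 ++ p :: P2)
    (R : PySem.Set String)
    (hmem : ∀ t, t ∈ R ↔ t ∈ P1.map PySem.Int.toStr
                  ∧ pvCondR (Std.HashSet.ofList ((pvPL n).reverse)) t = true) :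
    ((PySem.Str.len (PySem.Int.toStr p) == 1
      || PySem.Set.contains R (PySem.Str.slice (PySem.Int.toStr p) none (some (-1)))) = true)
      ↔ pvCondR (Std.HashSet.ofList ((pvPL n).reverse)) (PySem.Int.toStr p) = true := by
  set s := PySem.Int.toStr p with hs
  have hp2 : 2 ≤ p := by
    refine (pv_primesA_mem n ?_).1
    rw [hP]; exact List.mem_append.mpr (Or.inr (List.mem_cons_self))
  have hsPL : s ∈ pvPL n := by
    refine List.mem_map.mpr ⟨p, ?_, rfl⟩
    rw [hP]; exact List.mem_append.mpr (Or.inr (List.mem_cons_self))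
  have hlen1 : (PySem.Str.len s == 1) = true ↔ s.toList.length = 1 := by
    rw [PySem.Str.len_eq]
    simp
  have hinit : (pvStrPrefix s (s.toList.length - 1)).toList = s.toList.dropLast := by
    rw [pv_prefix_toList, List.dropLast_eq_take]
  rw [pv_condR_iff _ _ (pv_mem_psetn n), pv_slice_dropLast]
  rw [Bool.or_eq_true, hlen1, PySem.Set.contains_iff, hmem]
  constructor
  · rintro (h1 | ⟨htpre, htcond⟩)
    · intro k hk
      have : k = 0 := by omega
      subst this
      rw [pv_prefix_full s 1 (by omega)]
      exact hsPL
    · rw [pv_condR_iff _ _ (pv_mem_psetn n)] at htcond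
      intro k hk
      by_cases hke : k + 1 ≤ s.toList.length - 1
      · rw [← pv_prefix_shift s (pvStrPrefix s (s.toList.length - 1)) hinit k hke]
        refine htcond k ?_
        rw [pv_prefix_toList]
        simp only [List.length_take]
        omega
      · rw [pv_prefix_full s (k+1) (by omega)]
        exact hsPL
  · intro h
    by_cases hl : s.toList.length = 1
    · exact Or.inl hl
    · have hlen2 : 2 ≤ s.toList.length := by
        have hh := pv_toStr_len_pos p (by omega)
        have hsl : s.toList.length = (PySem.Int.toStr p).toList.length := by rw [hs]
        omega
      have hpref : pvStrPrefix s ((s.toList.length - 2) + 1) ∈ pvPL n := h (s.toList.length - 2) (by omega)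
      have hpe : (s.toList.length - 2) + 1 = s.toList.length - 1 := by omega
      rw [hpe] at hpref
      obtain ⟨r, hrP, hrs⟩ := List.mem_map.mp hpref
      have hr2 : 2 ≤ r := (pv_primesA_mem n hrP).1
      have hrlen : (PySem.Int.toChars r).length + 1 = (PySem.Int.toChars p).length := by
        have h1 : (PySem.Int.toStr r).toList = (pvStrPrefix s (s.toList.length - 1)).toList := by rw [hrs]
        rw [PySem.Int.toList_toStr, pv_prefix_toList] at h1
        have h2 : s.toList = PySem.Int.toChars p := by rw [hs, PySem.Int.toList_toStr]
        rw [h1, h2]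
        simp only [List.length_take]
        rw [h2] at hlen2
        omega
      have hrp : r < p := pv_shorter_lt (by omega) (by omega) hrlen
      refine Or.inr ⟨List.mem_map.mpr ⟨r, pv_mem_P1 n P1 P2 p r hP hrP hrp, ?_⟩, ?_⟩
      · exact hrs.symm ▸ rfl
      · rw [pv_condR_iff _ _ (pv_mem_psetn n)]
        intro j hj
        rw [← hrs] at hj ⊢
        have htl : (PySem.Int.toStr r).toList = s.toList.dropLast := by
          rw [hrs, hinit]
        have hjb : j + 1 ≤ s.toList.length - 1 := by
          rw [htl, List.dropLast_eq_take, List.length_take] at hj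
          omega
        rw [pv_prefix_shift s (PySem.Int.toStr r) htl j hjb]
        exact h j (by omega)

-- ----- the single-pass invariant -----
def pvOutMap : String → Int := fun t => (PySem.Int.ofStr? t).getD 0

def pvInv (n : Int) (pre : List String)
    (st : (PySem.Set String × PySem.Set String) × (Option Int × Option Int)) : Prop :=
  (∀ t, t ∈ st.1.1 ↔ t ∈ pre ∧ pvCondL (Std.HashSet.ofList ((pvPL n).reverse)) t = true) ∧
  (∀ t, t ∈ st.1.2 ↔ t ∈ pre ∧ pvCondR (Std.HashSet.ofList ((pvPL n).reverse)) t = true) ∧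
  st.2.1 = (pre.reverse.find? (pvCondL (Std.HashSet.ofList ((pvPL n).reverse)))).map pvOutMap ∧
  st.2.2 = (pre.reverse.find? (pvCondR (Std.HashSet.ofList ((pvPL n).reverse)))).map pvOutMap

lemma pv_inv_add (S : PySem.Set String) (pre : List String) (s : String) (cond : String → Bool)
    (hS : ∀ t, t ∈ S ↔ t ∈ pre ∧ cond t = true) (hcs : cond s = true) :
    ∀ t, t ∈ PySem.Set.add S s ↔ t ∈ pre ++ [s] ∧ cond t = true := by
  intro t
  rw [PySem.Set.mem_add, hS t, List.mem_append, List.mem_singleton]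
  constructor
  · rintro (⟨h1, h2⟩ | rfl)
    exacts [⟨Or.inl h1, h2⟩, ⟨Or.inr rfl, hcs⟩]
  · rintro ⟨h1 | rfl, h2⟩
    exacts [Or.inl ⟨h1, h2⟩, Or.inr rfl]

lemma pv_inv_keep (S : PySem.Set String) (pre : List String) (s : String) (cond : String → Bool)
    (hS : ∀ t, t ∈ S ↔ t ∈ pre ∧ cond t = true) (hcs : cond s = false) :
    ∀ t, t ∈ S ↔ t ∈ pre ++ [s] ∧ cond t = true := by
  intro t
  rw [hS t, List.mem_append, List.mem_singleton]
  constructor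
  · rintro ⟨h1, h2⟩
    exact ⟨Or.inl h1, h2⟩
  · rintro ⟨h1 | rfl, h2⟩
    · exact ⟨h1, h2⟩
    · rw [hcs] at h2; cases h2

lemma pv_step (n : Int) (P1 P2 : List Int) (p : Int) (hP : pvPrimesA n = P1 ++ p :: P2)
    (st : (PySem.Set String × PySem.Set String) × (Option Int × Option Int))
    (hinv : pvInv n (P1.map PySem.Int.toStr) st) :
    pvInv n (P1.map PySem.Int.toStr ++ [PySem.Int.toStr p]) (pvScanStepB st (PySem.Int.toStr p)) := by
  obtain ⟨hL, hR, ho1, ho2⟩ := hinv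
  set s := PySem.Int.toStr p with hs
  set pset := Std.HashSet.ofList ((pvPL n).reverse) with hpset
  have heqL := pv_eqL n P1 P2 p hP st.1.1 hL
  have heqR := pv_eqR n P1 P2 p hP st.1.2 hR
  rw [← hs, ← hpset] at heqL heqR
  have hrev : (P1.map PySem.Int.toStr ++ [s]).reverse = s :: (P1.map PySem.Int.toStr).reverse := by
    simp
  by_cases hcL : pvCondL pset s = true
  all_goals by_cases hcR : pvCondR pset s = true
  · -- both truncatable
    have hbL : (PySem.Str.len s == 1 || PySem.Set.contains st.1.1 (PySem.Str.slice s (some 1) none)) = true :=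
      heqL.mpr hcL
    have hbR : (PySem.Str.len s == 1 || PySem.Set.contains st.1.2 (PySem.Str.slice s none (some (-1)))) = true :=
      heqR.mpr hcR
    have hstep : pvScanStepB st s
        = ((PySem.Set.add st.1.1 s, PySem.Set.add st.1.2 s),
           (some ((PySem.Int.ofStr? s).getD 0), some ((PySem.Int.ofStr? s).getD 0))) := by
      simp only [pvScanStepB, hbL, hbR, reduceIte]
      try rfl
    rw [hstep]
    refine ⟨pv_inv_add _ _ _ _ hL hcL, pv_inv_add _ _ _ _ hR hcR, ?_, ?_⟩
    · rw [hrev, List.find?_cons_of_pos (h := hcL)]; rfl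
    · rw [hrev, List.find?_cons_of_pos (h := hcR)]; rfl
  · have hbL : (PySem.Str.len s == 1 || PySem.Set.contains st.1.1 (PySem.Str.slice s (some 1) none)) = true :=
      heqL.mpr hcL
    have hbR : (PySem.Str.len s == 1 || PySem.Set.contains st.1.2 (PySem.Str.slice s none (some (-1)))) = false :=
      Bool.eq_false_iff.mpr (fun h => hcR (heqR.mp h))
    have hstep : pvScanStepB st s
        = ((PySem.Set.add st.1.1 s, st.1.2), (some ((PySem.Int.ofStr? s).getD 0), st.2.2)) := by
      simp only [pvScanStepB, hbL, hbR, Bool.false_eq_true, reduceIte]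
      try rfl
    rw [hstep]
    refine ⟨pv_inv_add _ _ _ _ hL hcL, pv_inv_keep _ _ _ _ hR (Bool.eq_false_iff.mpr hcR), ?_, ?_⟩
    · rw [hrev, List.find?_cons_of_pos (h := hcL)]; rfl
    · rw [hrev, List.find?_cons_of_neg (h := hcR), ho2]
  · have hbL : (PySem.Str.len s == 1 || PySem.Set.contains st.1.1 (PySem.Str.slice s (some 1) none)) = false :=
      Bool.eq_false_iff.mpr (fun h => hcL (heqL.mp h))
    have hbR : (PySem.Str.len s == 1 || PySem.Set.contains st.1.2 (PySem.Str.slice s none (some (-1)))) = true :=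
      heqR.mpr hcR
    have hstep : pvScanStepB st s
        = ((st.1.1, PySem.Set.add st.1.2 s), (st.2.1, some ((PySem.Int.ofStr? s).getD 0))) := by
      simp only [pvScanStepB, hbL, hbR, Bool.false_eq_true, reduceIte]
      try rfl
    rw [hstep]
    refine ⟨pv_inv_keep _ _ _ _ hL (Bool.eq_false_iff.mpr hcL), pv_inv_add _ _ _ _ hR hcR, ?_, ?_⟩
    · rw [hrev, List.find?_cons_of_neg (h := hcL), ho1]
    · rw [hrev, List.find?_cons_of_pos (h := hcR)]; rfl
  · have hbL : (PySem.Str.len s == 1 || PySem.Set.contains st.1.1 (PySem.Str.slice s (some 1) none)) = false :=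
      Bool.eq_false_iff.mpr (fun h => hcL (heqL.mp h))
    have hbR : (PySem.Str.len s == 1 || PySem.Set.contains st.1.2 (PySem.Str.slice s none (some (-1)))) = false :=
      Bool.eq_false_iff.mpr (fun h => hcR (heqR.mp h))
    have hstep : pvScanStepB st s = st := by
      simp only [pvScanStepB, hbL, hbR, Bool.false_eq_true, reduceIte]
      try rfl
    rw [hstep]
    refine ⟨pv_inv_keep _ _ _ _ hL (Bool.eq_false_iff.mpr hcL),
            pv_inv_keep _ _ _ _ hR (Bool.eq_false_iff.mpr hcR), ?_, ?_⟩
    · rw [hrev, List.find?_cons_of_neg (h := hcL), ho1]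
    · rw [hrev, List.find?_cons_of_neg (h := hcR), ho2]

lemma pv_fold (n : Int) : ∀ (P2 P1 : List Int)
    (st : (PySem.Set String × PySem.Set String) × (Option Int × Option Int)),
    pvPrimesA n = P1 ++ P2 → pvInv n (P1.map PySem.Int.toStr) st →
    pvInv n ((P1 ++ P2).map PySem.Int.toStr) ((P2.map PySem.Int.toStr).foldl pvScanStepB st) := by
  intro P2
  induction P2 with
  | nil => intro P1 st h hinv; simpa using hinv
  | cons p P2 ih =>
    intro P1 st h hinv
    have hstep := pv_step n P1 P2 p h st hinv
    have h' : pvPrimesA n = (P1 ++ [p]) ++ P2 := by simpa using h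
    have := ih (P1 ++ [p]) (pvScanStepB st (PySem.Int.toStr p)) h' (by simpa using hstep)
    simpa using this


theorem truncatableprime_spec' (n : Int) : truncatableprime n = truncatableprime_alt n := by
  have hplist : ((PySem.List.pyRange 2 (n+1) 1).foldl (pvSieveStepB n) ((∅ : Std.HashSet Int), [])).2
      = (pvPrimesA n).map PySem.Int.toStr := by
    have h := pv_sieve_rel n (PySem.List.pyRange 2 (n+1) 1) (∅ : Std.HashSet Int) []
    simp only [List.map_nil] at h
    rw [h]
    rfl
  have hinv0 : pvInv n ([] : List String) ((PySem.Set.empty, PySem.Set.empty), (none, none)) := by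
    refine ⟨?_, ?_, rfl, rfl⟩ <;> intro t <;> simp [PySem.Set.empty]
  have hfold := pv_fold n (pvPrimesA n) [] ((PySem.Set.empty, PySem.Set.empty), (none, none)) (by simp) hinv0
  simp only [List.nil_append] at hfold
  obtain ⟨-, -, hoL, hoR⟩ := hfold
  simp only [truncatableprime, truncatableprime_alt]
  rw [hplist, pv_primelist_eq n]
  have hPL : (pvPrimesA n).map PySem.Int.toStr = pvPL n := rfl
  rw [hPL] at hoL hoR ⊢
  rw [hoL, hoR]
  cases hfL : (pvPL n).reverse.find? (pvCondL (Std.HashSet.ofList ((pvPL n).reverse))) <;>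
    cases hfR : (pvPL n).reverse.find? (pvCondR (Std.HashSet.ofList ((pvPL n).reverse))) <;>
    simp [pvOutMap]


-- ===== VERDICT (by name: the statement is the Claim_ definition above) =====
theorem truncatableprime_spec : Claim_equal_truncatableprime := by
  intro n _ _
  exact truncatableprime_spec' n
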